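-- pv_equiv track=rewrite | github.com/wdotmathree/VPN | forward.py | endAroundSum16
-- ===== SOURCE A (Python) =====
-- def endAroundSum16(data):
-- 	res = 0
-- 	for i in range(0, len(data), 2):
-- 		if i + 1 >= len(data):
-- 			res += data[i] << 8
-- 		else:
-- 			res += (data[i] << 8) | data[i + 1]
-- 	while res > 0xffff:
-- 		res = (res & 0xffff) + (res >> 16)
-- 	return res
-- ===== SOURCE B (Python) =====
-- def endAroundSum16(data):
-- 	res = 0
-- 	hi = None
-- 	for b in data:
-- 		if hi is None:
-- 			hi = b
-- 		else:
-- 			res += (hi << 8) | b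
-- 			hi = None
-- 	if hi is not None:
-- 		res += hi << 8
-- 	return (res - 1) % 0xffff + 1 if res > 0xffff else res
-- ===== Notes on version B (the rewrite author's own statement) =====
-- stated objective: alternative
-- what changed: Replaces A's index loop (range(0,len,2) with an in-body boundary branch) by a single streaming pass holding a pending high byte, and replaces the end-around carry while-loop entirely by the closed form (res-1) % 0xffff + 1 (valid because each carry step preserves the value mod 65535 and lands in 1..65535).
import Mathlib
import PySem

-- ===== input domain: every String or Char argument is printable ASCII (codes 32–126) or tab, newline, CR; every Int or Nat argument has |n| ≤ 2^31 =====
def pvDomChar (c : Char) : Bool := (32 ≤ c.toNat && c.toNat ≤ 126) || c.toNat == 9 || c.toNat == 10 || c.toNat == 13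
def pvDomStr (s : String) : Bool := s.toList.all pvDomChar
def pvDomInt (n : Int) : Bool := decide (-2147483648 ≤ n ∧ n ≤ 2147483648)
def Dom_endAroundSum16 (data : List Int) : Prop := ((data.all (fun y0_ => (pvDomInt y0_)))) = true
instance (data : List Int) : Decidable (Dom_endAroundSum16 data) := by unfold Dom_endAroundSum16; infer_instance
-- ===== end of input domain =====

-- B replaces A's index loop (with its in-body boundary branch) by a streaming pass that keeps a
-- pending high byte, and replaces the end-around carry while-loop by the closed form
-- (res-1) % 0xffff + 1; same O(n) cost, no speed claim.

-- A's carry-fold loop `while res > 0xffff: res = (res & 0xffff) + (res >> 16)`, written with a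
-- fuel counter (each iteration strictly decreases res.toNat, so fuel res.toNat is always enough;
-- proved in pvCarryF_closed below).
def pvCarryF : Nat → Int → Int
  | 0, r => r
  | f + 1, r =>
    if r > 0xffff then pvCarryF f (PySem.Int.band r 0xffff + r >>> (16:Nat)) else r

-- ===== PORT A =====
-- data[i] / data[i+1] are ported with pyGetD: the range indices are always in bounds.
def endAroundSum16 (data : List Int) : Int :=
  let res := ((PySem.List.pyRange 0 (data.length : Int) 2).foldl
    (fun res i =>
      if i + 1 ≥ (data.length : Int) then res + (PySem.List.pyGetD data i 0) <<< (8:Nat)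
      else res + PySem.Int.bor ((PySem.List.pyGetD data i 0) <<< (8:Nat)) (PySem.List.pyGetD data (i + 1) 0))
    0)
  pvCarryF res.toNat res

-- ===== PORT B =====
-- B's loop body: state = (res, pending high byte `hi`, Option since Python uses None).
def pvStep (s : Int × Option Int) (b : Int) : Int × Option Int :=
  match s.2 with
  | none => (s.1, some b)
  | some h => (s.1 + PySem.Int.bor (h <<< (8:Nat)) b, none)

-- B's post-loop `if hi is not None: res += hi << 8`.
def pvFin (s : Int × Option Int) : Int :=
  match s.2 with
  | some h => s.1 + h <<< (8:Nat)
  | none => s.1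

def endAroundSum16_alt (data : List Int) : Int :=
  let res := pvFin (data.foldl pvStep (0, none))
  if res > 0xffff then PySem.Int.mod (res - 1) 0xffff + 1 else res

-- ===== PRECONDITION & SPEC =====
def Spec_endAroundSum16 (data : List Int) (out : Int) : Prop := out = endAroundSum16_alt data
instance (data : List Int) (out : Int) : Decidable (Spec_endAroundSum16 data out) := by unfold Spec_endAroundSum16; infer_instance

-- ===== CLAIM (what is proved, stated in full; the proofs are below) =====
def Claim_equal_endAroundSum16 : Prop := ∀ (data : List Int), Dom_endAroundSum16 data → Spec_endAroundSum16 data (endAroundSum16 data)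

-- ===== LEMMAS AND PROOFS =====

theorem pyRange_pos_nil (a b s : Int) (hs : 0 < s) (h : b ≤ a) : PySem.List.pyRange a b s = [] := by
  rw [PySem.List.pyRange_of_pos a b hs, if_neg (by omega)]
  simp

-- the big-endian 16-bit word sum both loops compute
def pvBsum : List Int → Int
  | [] => 0
  | [x] => x <<< (8:Nat)
  | x :: y :: t => PySem.Int.bor (x <<< (8:Nat)) y + pvBsum t

theorem getD_append_len (pref l : List Int) (k : Nat) (d : Int) :
    (pref ++ l).getD (pref.length + k) d = l.getD k d := by
  simp [List.getD, List.getElem?_append_right (Nat.le_add_right pref.length k)]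

theorem pyRange_two_cons (a b : Int) (h : a < b) :
    PySem.List.pyRange a b 2 = a :: PySem.List.pyRange (a + 2) b 2 := by
  rw [PySem.List.pyRange_of_pos a b (by norm_num), PySem.List.pyRange_of_pos (a+2) b (by norm_num)]
  by_cases h2 : a + 2 < b
  · have hc : ((b - a + 2 - 1) / 2).toNat = ((b - (a+2) + 2 - 1) / 2).toNat + 1 := by
      have : b - a + 2 - 1 = (b - (a+2) + 2 - 1) + 1 * 2 := by ring
      rw [this, Int.add_mul_ediv_right _ _ (by norm_num)]
      omega
    simp only [if_pos h, if_pos h2, hc, List.range_succ_eq_map, List.map_cons, List.map_map]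
    refine List.cons_eq_cons.mpr ⟨by simp, List.map_congr_left (fun k _ => ?_)⟩
    simp [Function.comp]
    ring
  · have hc : ((b - a + 2 - 1) / 2).toNat = 1 := by
      have h3 : b - a = 1 ∨ b - a = 2 := by omega
      rcases h3 with h3 | h3 <;> rw [show b - a + 2 - 1 = (b-a) + 1 by ring, h3] <;> decide
    simp only [if_pos h, if_neg h2, hc]
    simp [List.range_succ]

theorem A_loop (data : List Int) : ∀ (rest pref : List Int), data = pref ++ rest → ∀ (acc : Int),
    (PySem.List.pyRange (pref.length : Int) (data.length : Int) 2).foldl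
      (fun res i =>
        if i + 1 ≥ (data.length : Int) then res + (PySem.List.pyGetD data i 0) <<< (8:Nat)
        else res + PySem.Int.bor ((PySem.List.pyGetD data i 0) <<< (8:Nat)) (PySem.List.pyGetD data (i + 1) 0))
      acc
    = acc + pvBsum rest := by
  intro rest
  induction rest using pvBsum.induct with
  | case1 =>
    intro pref hd acc
    have hlen : data.length = pref.length := by rw [hd]; simp
    rw [hlen, pyRange_pos_nil _ _ _ (by norm_num) (by omega)]
    simp [pvBsum]
  | case2 x =>
    intro pref hd acc
    have hlen : data.length = pref.length + 1 := by rw [hd]; simp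
    have hx : PySem.List.pyGetD data (pref.length : Int) 0 = x := by
      rw [PySem.List.pyGetD_natCast, hd, show pref.length = pref.length + 0 from rfl, getD_append_len]
      rfl
    rw [pyRange_two_cons _ _ (by rw [hlen]; push_cast; omega)]
    rw [pyRange_pos_nil _ _ _ (by norm_num) (by rw [hlen]; push_cast; omega)]
    simp only [List.foldl_cons, List.foldl_nil]
    rw [if_pos (by rw [hlen]; push_cast; omega), hx]
    simp [pvBsum]
  | case3 x y t ih =>
    intro pref hd acc
    have hlen : data.length = pref.length + t.length + 2 := by rw [hd]; simp; omega
    have hx : PySem.List.pyGetD data (pref.length : Int) 0 = x := by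
      rw [PySem.List.pyGetD_natCast, hd, show pref.length = pref.length + 0 from rfl, getD_append_len]
      rfl
    have hy : PySem.List.pyGetD data ((pref.length : Int) + 1) 0 = y := by
      rw [show ((pref.length : Int) + 1) = ((pref.length + 1 : Nat) : Int) by push_cast; ring,
          PySem.List.pyGetD_natCast, hd, getD_append_len]
      rfl
    rw [pyRange_two_cons _ _ (by rw [hlen]; push_cast; omega)]
    simp only [List.foldl_cons]
    rw [if_neg (by rw [hlen]; push_cast; omega), hx, hy]
    have hpl : ((pref.length : Int) + 2) = (((pref ++ [x, y]).length : Nat) : Int) := by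
      push_cast [List.length_append, List.length_cons, List.length_nil]
      ring
    rw [hpl, ih (pref ++ [x, y]) (by rw [hd]; simp) (acc + PySem.Int.bor (x <<< (8:Nat)) y)]
    simp [pvBsum]
    ring

-- B's streaming pass computes the same word sum
theorem B_loop : ∀ (xs : List Int) (acc : Int),
    pvFin (xs.foldl pvStep (acc, none)) = acc + pvBsum xs := by
  intro xs
  induction xs using pvBsum.induct with
  | case1 => intro acc; simp [pvFin, pvBsum]
  | case2 x => intro acc; simp [pvStep, pvFin, pvBsum]
  | case3 x y t ih =>
    intro acc
    simp only [List.foldl_cons, pvStep, pvBsum]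
    rw [ih]
    ring

-- one carry step rewritten arithmetically
theorem pvCarry_step (r : Int) (h : 65535 < r) :
    PySem.Int.band r 65535 + r >>> (16:Nat) = r % 65536 + r / 65536 := by
  have h0 : (0:Int) ≤ r := by omega
  rw [PySem.Int.band_of_nonneg h0 (by norm_num), Int.shiftRight_eq_div_pow]
  have hand : r.toNat &&& Int.toNat 65535 = r.toNat % 65536 := by
    have := Nat.and_two_pow_sub_one_eq_mod r.toNat 16
    norm_num at this
    exact this
  have hp : (((2:Nat) ^ 16 : Nat) : Int) = 65536 := by norm_num
  rw [hand, hp]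
  omega

theorem pvCarry_toNat_lt (r : Int) (h : 65535 < r) :
    (r % 65536 + r / 65536).toNat < r.toNat := by omega

-- the carry-fold loop has the closed form (r-1) % 65535 + 1 (any sufficient fuel)
theorem pvCarryF_closed : ∀ (f : Nat) (r : Int), r.toNat ≤ f →
    pvCarryF f r = if 65535 < r then (r - 1) % 65535 + 1 else r := by
  intro f
  induction f with
  | zero => intro r hr; rw [pvCarryF, if_neg (by omega)]
  | succ f ih =>
    intro r hr
    by_cases h : 65535 < r
    · rw [pvCarryF, if_pos h, if_pos h, pvCarry_step r h,
        ih _ (by have := pvCarry_toNat_lt r h; omega)]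
      split_ifs with h2 <;> omega
    · rw [pvCarryF, if_neg h, if_neg h]

-- ===== VERDICT (by name: the statement is the Claim_ definition above) =====
theorem endAroundSum16_spec : Claim_equal_endAroundSum16 := by
  intro data _
  unfold Spec_endAroundSum16
  simp only [endAroundSum16, endAroundSum16_alt]
  have hA := A_loop data data [] rfl 0
  simp only [List.length_nil, Nat.cast_zero] at hA
  rw [hA, B_loop data 0, pvCarryF_closed _ _ le_rfl]
  split_ifs with h
  · rw [PySem.Int.mod_eq_emod_of_pos (by norm_num : (0:Int) < 65535)]
  · rfl
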